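-- pv_equiv track=rewrite | github.com/jacobjennings/clarification | layer_calculator_3.py | convblock1d_params
-- ===== SOURCE A (Python) =====
-- def conv1d_params(in_channels: int, out_channels: int, kernel_size: int = 3) -> int:
--     """Parameters for Conv1d: weight + bias."""
--     return in_channels * out_channels * kernel_size + out_channels
--
-- def batchnorm_params(channels: int) -> int:
--     """Parameters for BatchNorm1d: weight + bias."""
--     return 2 * channels
--
-- def convblock1d_params(in_channels: int, out_channels: int, num_blocks: int = 2, last_layer: bool = False) -> int:
--     """
--     Parameters for ConvBlock1D.
--
--     Structure:
--     - Conv1d(in_channels → out_channels) + BatchNorm + ReLU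
--     - For each additional block:
--       - Conv1d(out_channels → out_channels or 1 if last) + BatchNorm + ReLU (unless last)
--     """
--     total = 0
--
--     # First conv + batchnorm
--     total += conv1d_params(in_channels, out_channels, kernel_size=3)
--     total += batchnorm_params(out_channels)
--
--     # Additional blocks
--     for i in range(num_blocks - 1):
--         is_last = (i == num_blocks - 2) and last_layer
--         final_out = 1 if is_last else out_channels
--
--         total += conv1d_params(out_channels, final_out, kernel_size=3)
--
--         if not is_last:
--             total += batchnorm_params(out_channels)
--
--     return total
-- ===== SOURCE B (Python) =====
-- def convblock1d_params(in_channels: int, out_channels: int, num_blocks: int = 2, last_layer: bool = False) -> int: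
--     """Closed-form parameter count: first conv+bn, identical middle blocks, optional special last block."""
--     total = 3 * in_channels * out_channels + 3 * out_channels  # first conv + batchnorm
--     extra = num_blocks - 1
--     if extra <= 0:
--         return total
--     middle = 3 * out_channels * out_channels + 3 * out_channels  # conv(out->out) + batchnorm
--     if last_layer:
--         return total + (extra - 1) * middle + 3 * out_channels + 1  # last: conv(out->1), no bn
--     return total + extra * middle
-- ===== Notes on version B (the rewrite author's own statement) =====
-- stated objective: faster
-- what changed: Replaced A's per-block loop by a closed-form arithmetic sum: first conv+bn, (extra) identical middle blocks multiplied out, and the optional special last block handled separately.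
import Mathlib
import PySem

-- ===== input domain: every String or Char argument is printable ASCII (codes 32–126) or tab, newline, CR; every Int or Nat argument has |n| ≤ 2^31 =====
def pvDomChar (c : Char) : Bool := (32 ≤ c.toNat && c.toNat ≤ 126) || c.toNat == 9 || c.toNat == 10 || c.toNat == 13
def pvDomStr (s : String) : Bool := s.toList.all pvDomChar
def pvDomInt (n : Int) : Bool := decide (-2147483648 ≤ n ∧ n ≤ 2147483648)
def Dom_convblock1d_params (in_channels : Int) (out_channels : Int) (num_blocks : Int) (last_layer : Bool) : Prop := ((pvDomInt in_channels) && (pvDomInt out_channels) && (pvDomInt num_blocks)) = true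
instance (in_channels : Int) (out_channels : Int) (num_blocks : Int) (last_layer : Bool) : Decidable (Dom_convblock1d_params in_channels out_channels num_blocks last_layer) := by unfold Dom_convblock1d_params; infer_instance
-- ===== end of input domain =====

-- B replaces A's per-block loop by a closed-form sum (first block + identical middle blocks + optional special last block); objective: faster (O(1) vs O(num_blocks)).

-- ===== PORT A =====
def conv1d_params (in_channels : Int) (out_channels : Int) (kernel_size : Int) : Int :=
  in_channels * out_channels * kernel_size + out_channels

def batchnorm_params (channels : Int) : Int := 2 * channels

def convblock1d_params (in_channels : Int) (out_channels : Int) (num_blocks : Int) (last_layer : Bool) : Int :=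
  let total : Int := 0
  let total := total + conv1d_params in_channels out_channels 3
  let total := total + batchnorm_params out_channels
  (PySem.List.pyRange 0 (num_blocks - 1) 1).foldl (fun total i =>
    let is_last := (i == num_blocks - 2) && last_layer
    let final_out : Int := if is_last then 1 else out_channels
    let total := total + conv1d_params out_channels final_out 3
    if !is_last then total + batchnorm_params out_channels else total) total

-- ===== PORT B =====
def convblock1d_params_alt (in_channels : Int) (out_channels : Int) (num_blocks : Int) (last_layer : Bool) : Int :=
  let total := 3 * in_channels * out_channels + 3 * out_channels
  let extra := num_blocks - 1
  if extra ≤ 0 then total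
  else
    let middle := 3 * out_channels * out_channels + 3 * out_channels
    if last_layer then total + (extra - 1) * middle + 3 * out_channels + 1
    else total + extra * middle

-- ===== PRECONDITION & SPEC =====
def Spec_convblock1d_params (in_channels : Int) (out_channels : Int) (num_blocks : Int) (last_layer : Bool) (out : Int) : Prop := out = convblock1d_params_alt in_channels out_channels num_blocks last_layer
instance (in_channels : Int) (out_channels : Int) (num_blocks : Int) (last_layer : Bool) (out : Int) : Decidable (Spec_convblock1d_params in_channels out_channels num_blocks last_layer out) := by unfold Spec_convblock1d_params; infer_instance

-- ===== CLAIM (what is proved, stated in full; the proofs are below) =====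
def Claim_equal_convblock1d_params : Prop := ∀ (in_channels : Int) (out_channels : Int) (num_blocks : Int) (last_layer : Bool), Dom_convblock1d_params in_channels out_channels num_blocks last_layer → Spec_convblock1d_params in_channels out_channels num_blocks last_layer (convblock1d_params in_channels out_channels num_blocks last_layer)

-- ===== LEMMAS AND PROOFS =====

-- The loop body of A's port, as a named function for the lemmas.
def pvStep (out_channels num_blocks : Int) (last_layer : Bool) (total i : Int) : Int :=
  let is_last := (i == num_blocks - 2) && last_layer
  let final_out : Int := if is_last then 1 else out_channels
  let total := total + conv1d_params out_channels final_out 3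
  if !is_last then total + batchnorm_params out_channels else total

-- On iterations that are not the special last one, the step adds the constant middle-block cost.
lemma pvStep_not_last (oc nb : Int) (ll : Bool) (t i : Int)
    (h : ((i == nb - 2) && ll) = false) :
    pvStep oc nb ll t i = t + (3 * oc * oc + 3 * oc) := by
  simp only [pvStep, h, conv1d_params, batchnorm_params]
  simp; ring

-- Folding the step over range(0, j) where no iteration is the special last one.
lemma pvLoop_const (oc nb : Int) (ll : Bool) (j : Nat) (t : Int)
    (h : ll = false ∨ (j : Int) ≤ nb - 2) :
    (PySem.List.pyRange 0 (j : Int) 1).foldl (pvStep oc nb ll) t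
      = t + (j : Int) * (3 * oc * oc + 3 * oc) := by
  induction j generalizing t with
  | zero => simp [PySem.List.pyRange_one_eq_nil]
  | succ k ih =>
    have hcast : ((k + 1 : Nat) : Int) = (k : Int) + 1 := by push_cast; ring
    rw [hcast, PySem.List.pyRange_one_succ_right (by positivity), List.foldl_append]
    have hk : ll = false ∨ (k : Int) ≤ nb - 2 := by rcases h with h | h; exact Or.inl h; right; omega
    rw [ih t hk, List.foldl_cons, List.foldl_nil]
    have hnl : (((k : Int) == nb - 2) && ll) = false := by
      rcases h with h | h
      · simp [h]
      · have : ¬ ((k : Int) = nb - 2) := by omega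
        simp [this]
    rw [pvStep_not_last oc nb ll _ _ hnl]; ring

-- The step at the genuine last iteration when last_layer is set.
lemma pvStep_last (oc nb t : Int) :
    pvStep oc nb true t (nb - 2) = t + (3 * oc + 1) := by
  simp only [pvStep, conv1d_params]
  simp; ring

-- ===== VERDICT (by name: the statement is the Claim_ definition above) =====
theorem convblock1d_params_spec : Claim_equal_convblock1d_params := by
  intro ic oc nb ll _
  show convblock1d_params ic oc nb ll = convblock1d_params_alt ic oc nb ll
  have hA : convblock1d_params ic oc nb ll
      = (PySem.List.pyRange 0 (nb - 1) 1).foldl (pvStep oc nb ll)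
          (0 + conv1d_params ic oc 3 + batchnorm_params oc) := by
    rfl
  rw [hA]
  by_cases h1 : nb - 1 ≤ 0
  · rw [PySem.List.pyRange_one_eq_nil h1, List.foldl_nil]
    simp only [convblock1d_params_alt, if_pos h1, conv1d_params, batchnorm_params]
    ring
  · have h2 : (1 : Int) ≤ nb - 1 := by omega
    cases ll with
    | false =>
      have hcast : ((nb - 1).toNat : Int) = nb - 1 := by omega
      rw [← hcast, pvLoop_const oc nb false _ _ (Or.inl rfl)]
      simp only [convblock1d_params_alt, if_neg h1, if_neg (Bool.false_ne_true),
        conv1d_params, batchnorm_params, hcast]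
      ring
    | true =>
      have hsplit : PySem.List.pyRange 0 (nb - 1) 1
          = PySem.List.pyRange 0 (nb - 2) 1 ++ [nb - 2] := by
        have : nb - 1 = (nb - 2) + 1 := by ring
        rw [this, PySem.List.pyRange_one_succ_right (by omega)]
      rw [hsplit, List.foldl_append, List.foldl_cons, List.foldl_nil]
      have hcast : ((nb - 2).toNat : Int) = nb - 2 := by omega
      rw [← hcast, pvLoop_const oc nb true _ _ (Or.inr (by omega)), hcast, pvStep_last]
      simp only [convblock1d_params_alt, if_neg h1, conv1d_params, batchnorm_params]
      norm_num
      ring
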